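-- pv_equiv track=rewrite | github.com/dark-pid/hyperdrive | app/api/util.py | extratc_metada_dspace
-- ===== SOURCE A (Python) =====
-- def extratc_metada_dspace(item_metada):
--     authors = []
--     title = ''
--     url = []
--     ext_pid = []
--     search_keys = []
--
--     for metada in item_metada:
--         if metada['key'] == 'dc.contributor.author':
--             authors.append(metada['value'].upper().strip())
--         if metada['key'] == 'dc.title':
--             title = metada['value'].upper()
--         if metada['key'] == 'dc.identifier.uri':
--             url.append(metada['value'])
--         if metada['key'] == 'dc.identifier.other':
--             ext_pid.append(metada['value'].strip())
--         if metada['key'] == 'dc.subject':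
--             search_keys.append(metada['value'].upper().strip())
--
--     return title,authors,url,ext_pid,search_keys
-- ===== SOURCE B (Python) =====
-- def extratc_metada_dspace(item_metada):
--     def matches(key):
--         return [m['value'] for m in item_metada if m['key'] == key]
--
--     titles = matches('dc.title')
--     title = titles[-1].upper() if titles else ''
--     authors = [v.upper().strip() for v in matches('dc.contributor.author')]
--     url = matches('dc.identifier.uri')
--     ext_pid = [v.strip() for v in matches('dc.identifier.other')]
--     search_keys = [v.upper().strip() for v in matches('dc.subject')]
--     return title, authors, url, ext_pid, search_keys
-- ===== Notes on version B (the rewrite author's own statement) =====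
-- stated objective: idiomatic
-- what changed: Replaces the single loop carrying five accumulators by independent list comprehensions (one filtered pass per metadata key), with the title taken as the last 'dc.title' match to honour A's repeated overwrite.
import Mathlib
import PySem

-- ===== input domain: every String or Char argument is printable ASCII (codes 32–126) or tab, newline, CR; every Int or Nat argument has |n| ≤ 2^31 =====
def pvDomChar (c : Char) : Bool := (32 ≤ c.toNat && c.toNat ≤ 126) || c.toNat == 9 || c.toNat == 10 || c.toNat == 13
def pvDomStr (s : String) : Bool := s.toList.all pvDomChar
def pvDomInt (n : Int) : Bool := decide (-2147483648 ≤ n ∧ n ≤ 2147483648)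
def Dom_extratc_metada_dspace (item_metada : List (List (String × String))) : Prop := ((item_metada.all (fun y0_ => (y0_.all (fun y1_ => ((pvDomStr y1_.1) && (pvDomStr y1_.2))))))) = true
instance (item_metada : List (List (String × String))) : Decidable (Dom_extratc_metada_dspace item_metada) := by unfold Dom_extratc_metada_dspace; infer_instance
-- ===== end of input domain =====

-- B replaces A's single loop over five accumulators by independent filtered passes, one per
-- metadata key (objective: idiomatic); return values proved equal on Pre_.

-- dict[str,str] is an association list; Python's d[k] is the first match (none = KeyError,
-- excluded by Pre_, so the default "" is never seen on admitted inputs)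
def pvVal (m : List (String × String)) (k : String) : String :=
  ((m.find? (fun p => p.1 == k)).map (fun p => p.2)).getD ""

-- ===== PORT A =====
def extratc_metada_dspace (item_metada : List (List (String × String))) : String × List String × List String × List String × List String :=
  let st := item_metada.foldl
    (fun (st : String × List String × List String × List String × List String) m =>
      let (title, authors, url, ext_pid, search_keys) := st
      let authors := if pvVal m "key" == "dc.contributor.author"
        then authors ++ [PySem.Str.strip (PySem.Str.upper (pvVal m "value"))] else authors
      let title := if pvVal m "key" == "dc.title"
        then PySem.Str.upper (pvVal m "value") else title
      let url := if pvVal m "key" == "dc.identifier.uri"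
        then url ++ [pvVal m "value"] else url
      let ext_pid := if pvVal m "key" == "dc.identifier.other"
        then ext_pid ++ [PySem.Str.strip (pvVal m "value")] else ext_pid
      let search_keys := if pvVal m "key" == "dc.subject"
        then search_keys ++ [PySem.Str.strip (PySem.Str.upper (pvVal m "value"))] else search_keys
      (title, authors, url, ext_pid, search_keys))
    ("", [], [], [], [])
  st

-- ===== PORT B =====
-- [m['value'] for m in item_metada if m['key'] == key]
def pvMatches (item_metada : List (List (String × String))) (key : String) : List String :=
  item_metada.filterMap (fun m => if pvVal m "key" == key then some (pvVal m "value") else none)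

def extratc_metada_dspace_alt (item_metada : List (List (String × String))) : String × List String × List String × List String × List String :=
  let titles := pvMatches item_metada "dc.title"
  let title := match titles.getLast? with
    | some v => PySem.Str.upper v
    | none => ""
  let authors := (pvMatches item_metada "dc.contributor.author").map
    (fun v => PySem.Str.strip (PySem.Str.upper v))
  let url := pvMatches item_metada "dc.identifier.uri"
  let ext_pid := (pvMatches item_metada "dc.identifier.other").map PySem.Str.strip
  let search_keys := (pvMatches item_metada "dc.subject").map
    (fun v => PySem.Str.strip (PySem.Str.upper v))
  (title, authors, url, ext_pid, search_keys)

-- ===== PRECONDITION & SPEC =====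
-- Pre_ = exactly where Python A returns: every entry has a 'key', and entries whose key is one
-- of the five extracted keys also have a 'value' (otherwise A raises KeyError; so does B).
def Pre_extratc_metada_dspace (item_metada : List (List (String × String))) : Prop :=
  ∀ m ∈ item_metada, (m.find? (fun p => p.1 == "key")).isSome ∧
    (pvVal m "key" ∈ (["dc.contributor.author", "dc.title", "dc.identifier.uri",
        "dc.identifier.other", "dc.subject"] : List String) →
      (m.find? (fun p => p.1 == "value")).isSome)
instance (item_metada : List (List (String × String))) : Decidable (Pre_extratc_metada_dspace item_metada) := by unfold Pre_extratc_metada_dspace; infer_instance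

def pvWitness_extratc_metada_dspace : (List (List (String × String))) :=
  [[("key", "dc.title"), ("value", "a b")], [("key", "dc.subject"), ("value", " x ")]]

def Spec_extratc_metada_dspace (item_metada : List (List (String × String))) (out : String × List String × List String × List String × List String) : Prop := out = extratc_metada_dspace_alt item_metada
instance (item_metada : List (List (String × String))) (out : String × List String × List String × List String × List String) : Decidable (Spec_extratc_metada_dspace item_metada out) := by unfold Spec_extratc_metada_dspace; infer_instance

-- ===== CLAIM (what is proved, stated in full; the proofs are below) =====
def Claim_equal_extratc_metada_dspace : Prop := ∀ (item_metada : List (List (String × String))), Dom_extratc_metada_dspace item_metada → Pre_extratc_metada_dspace item_metada → Spec_extratc_metada_dspace item_metada (extratc_metada_dspace item_metada)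

-- ===== LEMMAS AND PROOFS =====

-- the value A's repeatedly-overwritten title variable holds after the loop, as a fold
def pvTitleFold (l : List (List (String × String))) (t : String) : String :=
  (pvMatches l "dc.title").foldl (fun _ v => PySem.Str.upper v) t

theorem extratc_fold_char (l : List (List (String × String)))
    (t : String) (a u e s : List String) :
    l.foldl
      (fun (st : String × List String × List String × List String × List String) m =>
        let (title, authors, url, ext_pid, search_keys) := st
        let authors := if pvVal m "key" == "dc.contributor.author"
          then authors ++ [PySem.Str.strip (PySem.Str.upper (pvVal m "value"))] else authors
        let title := if pvVal m "key" == "dc.title"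
          then PySem.Str.upper (pvVal m "value") else title
        let url := if pvVal m "key" == "dc.identifier.uri"
          then url ++ [pvVal m "value"] else url
        let ext_pid := if pvVal m "key" == "dc.identifier.other"
          then ext_pid ++ [PySem.Str.strip (pvVal m "value")] else ext_pid
        let search_keys := if pvVal m "key" == "dc.subject"
          then search_keys ++ [PySem.Str.strip (PySem.Str.upper (pvVal m "value"))] else search_keys
        (title, authors, url, ext_pid, search_keys))
      (t, a, u, e, s)
    = (pvTitleFold l t,
       a ++ (pvMatches l "dc.contributor.author").map (fun v => PySem.Str.strip (PySem.Str.upper v)),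
       u ++ pvMatches l "dc.identifier.uri",
       e ++ (pvMatches l "dc.identifier.other").map PySem.Str.strip,
       s ++ (pvMatches l "dc.subject").map (fun v => PySem.Str.strip (PySem.Str.upper v))) := by
  induction l generalizing t a u e s with
  | nil => simp [pvTitleFold, pvMatches]
  | cons m rest ih =>
    simp only [List.foldl_cons, ih, pvTitleFold, pvMatches, List.filterMap_cons]
    split_ifs <;> simp

theorem foldl_last {α β : Type} (f : α → β) (xs : List α) (t : β) :
    xs.foldl (fun _ v => f v) t = (match xs.getLast? with
      | some v => f v
      | none => t) := by
  induction xs generalizing t with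
  | nil => simp
  | cons x xs ih =>
    cases xs with
    | nil => simp
    | cons y ys => exact ih t

-- ===== VERDICT (by name: the statement is the Claim_ definition above) =====
theorem extratc_metada_dspace_spec : Claim_equal_extratc_metada_dspace := by
  intro l _ _
  show extratc_metada_dspace l = extratc_metada_dspace_alt l
  simp only [extratc_metada_dspace, extratc_metada_dspace_alt, extratc_fold_char, pvTitleFold,
    List.nil_append]
  cases h : (pvMatches l "dc.title").getLast? <;> simp [foldl_last, h]
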